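-- pv_equiv track=rewrite | github.com/ding05/intro_to_python | 090219PA.py | num_rushes
-- ===== SOURCE A (Python) =====
-- def num_rushes(slope_height, rush_height_gain, back_sliding):
--     ''' Use the template '''
--     current_height = 0
--     rushes = 0
--     while current_height < slope_height:
--         current_height = current_height + rush_height_gain
--         rushes = rushes + 1
--         if current_height >= slope_height:
--             break
--         else:
--             current_height = current_height - back_sliding
--     return rushes
-- ===== SOURCE B (Python) =====
-- def num_rushes(slope_height, rush_height_gain, back_sliding):
--     ''' Closed-form: number of rushes via ceiling division, no loop. '''
--     if slope_height <= 0: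
--         return 0
--     if rush_height_gain >= slope_height:
--         return 1
--     d = rush_height_gain - back_sliding
--     need = slope_height - max(back_sliding, 0)
--     return -(-need // d)
-- ===== Notes on version B (the rewrite author's own statement) =====
-- stated objective: simpler
-- what changed: Replaces the step-by-step climbing loop with a closed-form ceiling division (accounting for the while-check exit when back_sliding is negative).
import Mathlib
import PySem

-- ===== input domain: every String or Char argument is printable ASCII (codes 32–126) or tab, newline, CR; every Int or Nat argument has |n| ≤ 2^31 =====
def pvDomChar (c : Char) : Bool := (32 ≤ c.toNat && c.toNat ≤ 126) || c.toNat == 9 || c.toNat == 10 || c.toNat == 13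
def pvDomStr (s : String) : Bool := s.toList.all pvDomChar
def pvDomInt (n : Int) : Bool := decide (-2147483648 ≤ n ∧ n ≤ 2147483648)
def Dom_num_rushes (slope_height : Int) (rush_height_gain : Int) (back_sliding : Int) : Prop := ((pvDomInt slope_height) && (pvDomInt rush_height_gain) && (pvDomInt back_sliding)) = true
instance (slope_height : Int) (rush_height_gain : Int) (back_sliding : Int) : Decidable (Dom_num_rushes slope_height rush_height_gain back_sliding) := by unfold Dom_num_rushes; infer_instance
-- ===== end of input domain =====

-- B replaces A's step-by-step climbing loop by a closed-form ceiling division (objective: simpler).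

-- ===== PORT A =====
-- A's while-loop, transliterated with a fuel bound; under Dom ∧ Pre the loop
-- performs at most slope_height ≤ 2^31 iterations, so the fuel never runs out.
def numRushesLoop (fuel : Nat) (slope_height rush_height_gain back_sliding : Int)
    (current_height rushes : Int) : Int :=
  match fuel with
  | 0 => rushes
  | f + 1 =>
    if current_height < slope_height then
      let current_height := current_height + rush_height_gain
      let rushes := rushes + 1
      if current_height ≥ slope_height then rushes
      else numRushesLoop f slope_height rush_height_gain back_sliding
             (current_height - back_sliding) rushes
    else rushes

def num_rushes (slope_height : Int) (rush_height_gain : Int) (back_sliding : Int) : Int :=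
  numRushesLoop 2147483648 slope_height rush_height_gain back_sliding 0 0

-- ===== PORT B =====
def num_rushes_alt (slope_height : Int) (rush_height_gain : Int) (back_sliding : Int) : Int :=
  if slope_height ≤ 0 then 0
  else if rush_height_gain ≥ slope_height then 1
  else
    let d := rush_height_gain - back_sliding;
    let need := slope_height - max back_sliding 0;
    -(PySem.Int.floordiv (-need) d)

-- ===== PRECONDITION & SPEC =====
-- Pre_ excludes exactly the inputs on which A's while-loop never terminates
-- (slope still ahead, and each full rush-and-slide cycle gains nothing).
def Pre_num_rushes (slope_height : Int) (rush_height_gain : Int) (back_sliding : Int) : Prop :=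
  slope_height ≤ 0 ∨ rush_height_gain ≥ slope_height ∨ back_sliding < rush_height_gain
instance (slope_height : Int) (rush_height_gain : Int) (back_sliding : Int) : Decidable (Pre_num_rushes slope_height rush_height_gain back_sliding) := by unfold Pre_num_rushes; infer_instance

def pvWitness_num_rushes : Int × Int × Int := (10, 3, 1)

def Spec_num_rushes (slope_height : Int) (rush_height_gain : Int) (back_sliding : Int) (out : Int) : Prop := out = num_rushes_alt slope_height rush_height_gain back_sliding
instance (slope_height : Int) (rush_height_gain : Int) (back_sliding : Int) (out : Int) : Decidable (Spec_num_rushes slope_height rush_height_gain back_sliding out) := by unfold Spec_num_rushes; infer_instance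

-- ===== CLAIM (what is proved, stated in full; the proofs are below) =====
def Claim_equal_num_rushes : Prop := ∀ (slope_height : Int) (rush_height_gain : Int) (back_sliding : Int), Dom_num_rushes slope_height rush_height_gain back_sliding → Pre_num_rushes slope_height rush_height_gain back_sliding → Spec_num_rushes slope_height rush_height_gain back_sliding (num_rushes slope_height rush_height_gain back_sliding)

-- ===== LEMMAS AND PROOFS =====

-- One unfolding of the loop.
theorem numRushesLoop_succ (f : Nat) (H g s cur r : Int) :
    numRushesLoop (f + 1) H g s cur r =
      if cur < H then
        (if cur + g ≥ H then r + 1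
         else numRushesLoop f H g s (cur + g - s) (r + 1))
      else r := rfl

-- When the while-condition already fails, the loop returns `rushes` for every fuel.
theorem numRushesLoop_exit (f : Nat) (H g s cur r : Int) (h : ¬ cur < H) :
    numRushesLoop f H g s cur r = r := by
  cases f with
  | zero => rfl
  | succ f => simp [numRushesLoop, h]

-- Main loop invariant: if the slope is still ahead and the remaining need
-- X = H - cur - max s 0 is positive and within the fuel, the loop returns
-- r + ⌈X / (g - s)⌉.
theorem numRushesLoop_eq (g s : Int) (hd : 0 < g - s) :
    ∀ (f : Nat) (H cur r : Int), cur < H → 0 < H - cur - max s 0 →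
      H - cur - max s 0 ≤ (f : Int) →
      numRushesLoop f H g s cur r
        = r + -(PySem.Int.floordiv (-(H - cur - max s 0)) (g - s)) := by
  intro f
  induction f with
  | zero => intro H cur r h1 h2 h3; exact absurd h3 (by push_cast; omega)
  | succ f ih =>
    intro H cur r h1 h2 h3
    rw [numRushesLoop_succ, if_pos h1]
    by_cases hbrk : cur + g ≥ H
    · -- break: one rush finishes; the ceiling equals 1
      rw [if_pos hbrk]
      have : -(PySem.Int.floordiv (-(H - cur - max s 0)) (g - s)) = 1 := by
        rw [PySem.Int.neg_floordiv_neg_eq_iff_of_pos hd]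
        constructor <;> [omega; omega]
      omega
    · rw [if_neg hbrk]
      by_cases hout : cur + g - s < H
      · -- continue looping: one more rush, need shrinks by g - s
        have hx2 : 0 < H - (cur + g - s) - max s 0 := by
          by_cases hs : s ≤ 0
          · have : max s 0 = 0 := by omega
            omega
          · have : max s 0 = s := by omega
            omega
        have := ih H (cur + g - s) (r + 1) hout hx2 (by push_cast at h3 ⊢; omega)
        rw [this]
        -- ⌈X/d⌉ = 1 + ⌈(X-d)/d⌉
        have key : -(PySem.Int.floordiv (-(H - cur - max s 0)) (g - s))
            = 1 + -(PySem.Int.floordiv (-(H - (cur + g - s) - max s 0)) (g - s)) := by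
          rw [PySem.Int.neg_floordiv_neg_eq_iff_of_pos hd]
          obtain ⟨hlo, hhi⟩ :=
            (PySem.Int.neg_floordiv_neg_eq_iff_of_pos hd
              (a := H - (cur + g - s) - max s 0)
              (q := -(PySem.Int.floordiv (-(H - (cur + g - s) - max s 0)) (g - s)))).mp rfl
          constructor <;> nlinarith
        omega
      · -- while-check exit after sliding: the loop stops with r + 1 rushes
        rw [numRushesLoop_exit f H g s _ _ (by omega)]
        have : -(PySem.Int.floordiv (-(H - cur - max s 0)) (g - s)) = 1 := by
          rw [PySem.Int.neg_floordiv_neg_eq_iff_of_pos hd]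
          constructor <;> omega
        omega

-- ===== VERDICT (by name: the statement is the Claim_ definition above) =====
theorem num_rushes_spec : Claim_equal_num_rushes := by
  intro H g s hdom hpre
  unfold Spec_num_rushes num_rushes num_rushes_alt
  by_cases h0 : H ≤ 0
  · rw [numRushesLoop_exit _ _ _ _ _ _ (by omega), if_pos h0]
  · rw [if_neg h0]
    by_cases h1 : g ≥ H
    · -- first rush reaches the top
      rw [if_pos h1, show (2147483648 : Nat) = 2147483647 + 1 from rfl,
          numRushesLoop_succ, if_pos (by omega : (0:Int) < H),
          if_pos (by omega : 0 + g ≥ H)]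
      omega
    · rw [if_neg h1]
      have hd : 0 < g - s := by
        rcases hpre with h | h | h <;> omega
      have hdomH : H ≤ 2147483648 := by
        simp only [Dom_num_rushes, pvDomInt, Bool.and_eq_true, decide_eq_true_eq] at hdom
        omega
      have := numRushesLoop_eq g s hd 2147483648 H 0 0 (by omega)
        (by have : (0:Int) ≤ max s 0 := le_max_right _ _; omega)
        (by push_cast
            have : (0:Int) ≤ max s 0 := le_max_right _ _
            omega)
      rw [this]
      ring_nf
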